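-- pv_equiv track=rewrite | github.com/xudaniel11/interview_preparation | max_nonnegative_subarray.py | max_nonnegative_subarray
-- ===== SOURCE A (Python) =====
-- def max_nonnegative_subarray(arr):
--     N = len(arr)
--     curr_sum = 0
--     max_sum = 0
--     start, end = 0, 0
--     start_max, end_max = -1, -1
--     possibilities = []
--
--     while end < N:
--         if arr[end] >= 0:
--             curr_sum += arr[end]
--             if curr_sum > max_sum:
--                 max_sum = curr_sum
--                 start_max = start
--                 end_max = end + 1
--             elif curr_sum == max_sum:
--                 if end + 1 - start > end_max - start_max:
--                     start_max = start
--                     end_max = end + 1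
--         else:
--             start = end + 1
--             curr_sum = 0
--         end += 1
--
--     if start_max == -1 or end_max == -1:
--         return []
--     else:
--         return arr[start_max:end_max]
-- ===== SOURCE B (Python) =====
-- def max_nonnegative_subarray(arr):
--     # Pass 1: collect maximal runs of non-negative elements as (start, end, sum).
--     runs = []
--     cur = None  # (start, running_sum) of the open run
--     for i, v in enumerate(arr):
--         if v >= 0:
--             cur = (i, v) if cur is None else (cur[0], cur[1] + v)
--         else:
--             if cur is not None:
--                 runs.append((cur[0], i, cur[1]))
--                 cur = None
--     if cur is not None:
--         runs.append((cur[0], len(arr), cur[1]))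
--     # Pass 2: pick the best run (greatest sum, longest on ties, earliest wins).
--     best = None
--     for s, e, t in runs:
--         if best is None or t > best[2] or (t == best[2] and e - s > best[1] - best[0]):
--             best = (s, e, t)
--     return arr[best[0]:best[1]] if best is not None else []
-- ===== Notes on version B (the rewrite author's own statement) =====
-- stated objective: alternative
-- what changed: A's single fused scan (running sum, window start and best window updated per element) is replaced by two separate passes: first materialise the list of maximal non-negative runs with their (start, end, sum), then fold a best-run selection (greater sum, longer on equal sum, earliest on a full tie) over that list and slice the winner.
import Mathlib
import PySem

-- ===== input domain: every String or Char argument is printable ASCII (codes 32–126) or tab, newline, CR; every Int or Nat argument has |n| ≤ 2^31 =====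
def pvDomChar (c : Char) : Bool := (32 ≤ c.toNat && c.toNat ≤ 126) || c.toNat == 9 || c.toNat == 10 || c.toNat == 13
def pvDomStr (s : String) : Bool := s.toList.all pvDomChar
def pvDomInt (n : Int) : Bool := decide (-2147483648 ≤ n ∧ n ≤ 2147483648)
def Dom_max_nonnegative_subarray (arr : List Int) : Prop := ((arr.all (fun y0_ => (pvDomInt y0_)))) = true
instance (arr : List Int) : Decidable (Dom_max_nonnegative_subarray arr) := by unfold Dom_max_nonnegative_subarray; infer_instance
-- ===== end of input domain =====

-- B replaces A's fused scan by two passes — materialise the maximal non-negative runs, then fold a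
-- best-run selection over them (objective: alternative decomposition, same O(n) cost).

-- ===== PORT A =====
-- state = (curr_sum, max_sum, start, end, start_max, end_max); the while loop walks arr once.
def aStep (st : Int × Int × Int × Int × Int × Int) (v : Int) :
    Int × Int × Int × Int × Int × Int :=
  match st with
  | (cs, ms, start, e, sm, em) =>
    if v ≥ 0 then
      let cs' := cs + v
      if cs' > ms then (cs', cs', start, e + 1, start, e + 1)
      else if cs' = ms then
        if e + 1 - start > em - sm then (cs', ms, start, e + 1, start, e + 1)
        else (cs', ms, start, e + 1, sm, em)
      else (cs', ms, start, e + 1, sm, em)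
    else (0, ms, e + 1, e + 1, sm, em)

def max_nonnegative_subarray (arr : List Int) : List Int :=
  match arr.foldl aStep (0, 0, 0, 0, -1, -1) with
  | (_, _, _, _, sm, em) =>
    if sm = -1 ∨ em = -1 then [] else PySem.List.slice arr (some sm) (some em)

-- ===== PORT B =====
-- pass 1: group into maximal runs of non-negative elements, state = (runs, open run, index)
def bGroup (st : List (Int × Int × Int) × Option (Int × Int) × Int) (v : Int) :
    List (Int × Int × Int) × Option (Int × Int) × Int :=
  match st with
  | (runs, cur, i) =>
    if v ≥ 0 then
      match cur with
      | none => (runs, some (i, v), i + 1)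
      | some (s, t) => (runs, some (s, t + v), i + 1)
    else
      match cur with
      | none => (runs, none, i + 1)
      | some (s, t) => (runs ++ [(s, i, t)], none, i + 1)

def bRuns (arr : List Int) : List (Int × Int × Int) :=
  match arr.foldl bGroup ([], none, 0) with
  | (runs, none, _) => runs
  | (runs, some (s, t), n) => runs ++ [(s, n, t)]

-- pass 2: best run = greatest sum, longest on equal sum, earliest on a full tie
def bSel (best : Option (Int × Int × Int)) (r : Int × Int × Int) : Option (Int × Int × Int) :=
  match best, r with
  | none, r => some r
  | some (bs, be, bt), (s, e, t) =>
    if t > bt ∨ (t = bt ∧ e - s > be - bs) then some (s, e, t) else some (bs, be, bt)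

def max_nonnegative_subarray_alt (arr : List Int) : List Int :=
  match (bRuns arr).foldl bSel none with
  | none => []
  | some (s, e, _) => PySem.List.slice arr (some s) (some e)

-- ===== PRECONDITION & SPEC =====
def Spec_max_nonnegative_subarray (arr : List Int) (out : List Int) : Prop := out = max_nonnegative_subarray_alt arr
instance (arr : List Int) (out : List Int) : Decidable (Spec_max_nonnegative_subarray arr out) := by unfold Spec_max_nonnegative_subarray; infer_instance

-- ===== CLAIM (what is proved, stated in full; the proofs are below) =====
def Claim_equal_max_nonnegative_subarray : Prop := ∀ (arr : List Int), Dom_max_nonnegative_subarray arr → Spec_max_nonnegative_subarray arr (max_nonnegative_subarray arr)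

-- ===== LEMMAS AND PROOFS =====

-- A's best triple (max_sum, start_max, end_max) corresponds to B's optional best run
def corr (t : Int × Int × Int) (b : Option (Int × Int × Int)) : Prop :=
  match t, b with
  | (ms, sm, em), none => ms = 0 ∧ sm = -1 ∧ em = -1
  | (ms, sm, em), some (s, e, tt) => ms = tt ∧ sm = s ∧ em = e ∧ 0 ≤ s ∧ s < e

-- the loop invariant tying A's fused state to B's grouping state
def LoopInv : (Int × Int × Int × Int × Int × Int) →
    (List (Int × Int × Int) × Option (Int × Int) × Int) → Prop
  | (cs, ms, start, e, sm, em), (runs, cur, i) =>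
    e = i ∧ 0 ≤ i ∧
    (match cur with
     | none => cs = 0 ∧ start = i ∧ corr (ms, sm, em) (runs.foldl bSel none)
     | some (s0, t) => cs = t ∧ start = s0 ∧ 0 ≤ s0 ∧ s0 < i ∧
         corr (ms, sm, em) (bSel (runs.foldl bSel none) (s0, i, t)))

lemma inv_step (v : Int) (a : Int × Int × Int × Int × Int × Int)
    (b : List (Int × Int × Int) × Option (Int × Int) × Int) (h : LoopInv a b) :
    LoopInv (aStep a v) (bGroup b v) := by
  obtain ⟨cs, ms, start, e, sm, em⟩ := a
  obtain ⟨runs, cur, i⟩ := b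
  obtain ⟨he, hi, hrest⟩ := h
  subst he
  by_cases hv : v ≥ 0
  · cases cur with
    | none =>
      obtain ⟨hcs, hst, hc⟩ := hrest
      subst hcs hst
      simp only [aStep, bGroup, hv, if_true, LoopInv]
      refine ⟨?_, by omega, ?_⟩
      · split_ifs <;> rfl
      · rcases hp : runs.foldl bSel none with _ | ⟨bs, be, bt⟩ <;> rw [hp] at hc <;>
          simp only [bSel] <;> simp only [corr] at hc <;>
          split_ifs <;> simp only [corr, true_and] <;> omega
    | some st0 =>
      obtain ⟨s0, t⟩ := st0
      obtain ⟨hcs, hst, hs0, hsi, hc⟩ := hrest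
      subst hcs hst
      simp only [aStep, bGroup, hv, if_true, LoopInv]
      refine ⟨?_, by omega, ?_⟩
      · split_ifs <;> rfl
      · rcases hp : runs.foldl bSel none with _ | ⟨bs, be, bt⟩ <;> rw [hp] at hc <;>
          simp only [bSel] at hc ⊢
        · simp only [corr] at hc
          split_ifs <;> simp only [corr, true_and] <;> omega
        · split_ifs at hc ⊢ <;> simp only [corr, true_and] at hc ⊢ <;> omega
  · cases cur with
    | none =>
      obtain ⟨hcs, hst, hc⟩ := hrest
      simp only [aStep, bGroup, hv, if_false, LoopInv]
      exact ⟨by trivial, by omega, by trivial, by trivial, hc⟩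
    | some st0 =>
      obtain ⟨s0, t⟩ := st0
      obtain ⟨hcs, hst, hs0, hsi, hc⟩ := hrest
      simp only [aStep, bGroup, hv, if_false, LoopInv]
      refine ⟨by trivial, by omega, by trivial, by trivial, ?_⟩
      rw [List.foldl_append]
      simpa using hc

lemma inv_fold (l : List Int) (a : Int × Int × Int × Int × Int × Int)
    (b : List (Int × Int × Int) × Option (Int × Int) × Int) (h : LoopInv a b) :
    LoopInv (l.foldl aStep a) (l.foldl bGroup b) := by
  induction l generalizing a b with
  | nil => simpa using h
  | cons v l ih =>
    simp only [List.foldl_cons]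
    exact ih _ _ (inv_step v a b h)

-- ===== VERDICT (by name: the statement is the Claim_ definition above) =====
theorem max_nonnegative_subarray_spec : Claim_equal_max_nonnegative_subarray := by
  unfold Claim_equal_max_nonnegative_subarray
  intro arr _
  unfold Spec_max_nonnegative_subarray max_nonnegative_subarray max_nonnegative_subarray_alt bRuns
  have h := inv_fold arr (0, 0, 0, 0, -1, -1) ([], none, 0)
    ⟨rfl, le_refl _, rfl, rfl, rfl, rfl, rfl⟩
  rcases hA : arr.foldl aStep (0, 0, 0, 0, -1, -1) with ⟨cs, ms, start, e, sm, em⟩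
  rcases hB : arr.foldl bGroup ([], none, 0) with ⟨runs, cur, n⟩
  rw [hA, hB] at h
  obtain ⟨he, hn, hrest⟩ := h
  cases cur with
  | none =>
    obtain ⟨hcs, hst, hc⟩ := hrest
    rcases hp : runs.foldl bSel none with _ | ⟨s, e', t⟩ <;> rw [hp] at hc <;>
      simp only [corr] at hc
    · obtain ⟨h1, h2, h3⟩ := hc
      subst h2; subst h3
      simp
    · obtain ⟨h1, h2, h3, h4, h5⟩ := hc
      subst h1; subst h2; subst h3
      have hg : ¬(sm = -1 ∨ em = -1) := by omega
      simp [hg]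
  | some st0 =>
    obtain ⟨s0, t⟩ := st0
    obtain ⟨hcs, hst, hs0, hsi, hc⟩ := hrest
    rw [List.foldl_append]
    simp only [List.foldl_cons, List.foldl_nil]
    rcases hq : bSel (runs.foldl bSel none) (s0, n, t) with _ | ⟨s, e', t'⟩ <;> rw [hq] at hc
    · exact absurd hq (by
        rcases runs.foldl bSel none with _ | ⟨⟨bs, be, bt⟩⟩
        · simp [bSel]
        · simp only [bSel]; split_ifs <;> simp)
    · simp only [corr] at hc
      obtain ⟨h1, h2, h3, h4, h5⟩ := hc
      subst h1; subst h2; subst h3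
      have hg : ¬(sm = -1 ∨ em = -1) := by omega
      simp [hg]
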